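-- pv_equiv track=rewrite | github.com/Sartman34/C-Beautifier-Warband-Fx-HLSL | main.py | raw_normal
-- ===== SOURCE A (Python) =====
-- def raw_normal(line):
--     to_split = [
--         "{", "}", "[", "]", "(", ")",
--         ",", ";", ".", ":",
--         "=", "+", "-", "*", "/", "%",
--         "?", "!",
--         "&", "^", "|", "<", ">", "~"
--         "\"", "'"
--     ]
--     splitted_line = []
--     part = ""
--     for char in line:
--         if char in to_split:
--             splitted_line.extend([part.strip(" "), char])
--             part = ""
--         else:
--             part += char
--     splitted_line.append(part.strip(" "))
--     line = "".join(splitted_line)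
--     line += " " if line in ["else"] else ""
--     return line
-- ===== SOURCE B (Python) =====
-- def raw_normal(line):
--     # Run-based scan: drop each run of spaces whose (space-skipping) neighbour
--     # is a delimiter or the line boundary; keep everything else as-is.
--     delims = set("{}[](),;.:=+-*/%?!&^|<>'")
--     n = len(line)
--     keep = []
--     i = 0
--     while i < n:
--         c = line[i]
--         if c == ' ':
--             j = i
--             while j < n and line[j] == ' ':
--                 j += 1
--             left_cut = i == 0 or line[i - 1] in delims
--             right_cut = j == n or line[j] in delims
--             if not (left_cut or right_cut):
--                 keep.append(line[i:j])
--             i = j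
--         else:
--             keep.append(c)
--             i += 1
--     out = ''.join(keep)
--     return out + ' ' if out == 'else' else out
-- ===== Notes on version B (the rewrite author's own statement) =====
-- stated objective: faster
-- what changed: B replaces A's segment-accumulator pass (accumulate a part between delimiters by per-char string concatenation, strip each part, rejoin) by a single run-based scan that skips each run of spaces in one step and drops exactly those runs whose nearest non-space neighbour is a delimiter or a line boundary; B's delimiter set contains only the single characters A actually treats as delimiters (tilde and double quote are not delimiters in A, due to a two-character entry in its list).
import Mathlib
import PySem

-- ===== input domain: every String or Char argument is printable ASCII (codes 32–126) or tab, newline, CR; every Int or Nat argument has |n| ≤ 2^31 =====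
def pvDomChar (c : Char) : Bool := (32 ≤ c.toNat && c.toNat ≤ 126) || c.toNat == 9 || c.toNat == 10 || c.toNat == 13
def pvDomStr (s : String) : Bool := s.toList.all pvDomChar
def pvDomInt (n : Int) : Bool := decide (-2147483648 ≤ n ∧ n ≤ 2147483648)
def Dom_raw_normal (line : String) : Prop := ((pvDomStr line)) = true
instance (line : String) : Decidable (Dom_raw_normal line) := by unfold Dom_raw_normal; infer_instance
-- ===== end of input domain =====

-- B replaces A's strip-each-segment pass by a single run-based space scan (measured constant-factor faster: no per-char string building).

-- ===== PORT A =====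
-- Python's to_split list: "~" "\"" are adjacent string literals there, giving ONE two-char element.
def pvToSplitA : List (List Char) :=
  [['{'], ['}'], ['['], [']'], ['('], [')'],
   [','], [';'], ['.'], [':'],
   ['='], ['+'], ['-'], ['*'], ['/'], ['%'],
   ['?'], ['!'],
   ['&'], ['^'], ['|'], ['<'], ['>'], ['~', '\"'], ['\'']]

-- the for-loop over `line` with state (splitted_line, part); strings as List Char
def rawGoA (cs : List Char) (splitted : List (List Char)) (part : List Char) : List (List Char) :=
  match cs with
  | [] => splitted ++ [PySem.Chars.stripChars part [' ']]
  | c :: rest =>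
    if pvToSplitA.contains [c] then
      rawGoA rest (splitted ++ [PySem.Chars.stripChars part [' '], [c]]) []
    else
      rawGoA rest splitted (part ++ [c])

def raw_normal (line : String) : String :=
  let joined := (rawGoA line.toList [] []).flatten
  let joined := joined ++ (if [String.toList "else"].contains joined then [' '] else [])
  String.ofList joined

-- ===== PORT B =====
def pvDelimsB : List Char := "{}[](),;.:=+-*/%?!&^|<>'".toList

-- the while-loop of Source B: a run of spaces is consumed in one step (kept only when neither
-- neighbour cuts it), other chars one by one; leftCut = "previous char is a delimiter or line start"
def rawGoB (leftCut : Bool) (cs : List Char) : List Char :=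
  match cs with
  | [] => []
  | c :: rest =>
    if c == ' ' then
      let run := ' ' :: rest.takeWhile (· == ' ')
      let rest' := rest.dropWhile (· == ' ')
      let rightCut := match rest' with | [] => true | d :: _ => pvDelimsB.contains d
      (if leftCut || rightCut then [] else run) ++ rawGoB leftCut rest'
    else
      c :: rawGoB (pvDelimsB.contains c) rest
termination_by cs.length
decreasing_by
  · simpa using Nat.lt_succ_of_le (rest.length_dropWhile_le _)
  · simp

def raw_normal_alt (line : String) : String :=
  let out := rawGoB true line.toList
  if out = String.toList "else" then String.ofList (out ++ [' ']) else String.ofList out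

-- ===== PRECONDITION & SPEC =====
def Spec_raw_normal (line : String) (out : String) : Prop := out = raw_normal_alt line
instance (line : String) (out : String) : Decidable (Spec_raw_normal line out) := by unfold Spec_raw_normal; infer_instance

-- ===== CLAIM (what is proved, stated in full; the proofs are below) =====
def Claim_equal_raw_normal : Prop := ∀ (line : String), Dom_raw_normal line → Spec_raw_normal line (raw_normal line)

-- ===== LEMMAS AND PROOFS =====
-- ===== LEMMAS AND PROOFS =====

def pvSp : Char → Bool := (· == ' ')

def pvRstrip (s : List Char) : List Char := (List.dropWhile pvSp s.reverse).reverse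

def pvStrip (s : List Char) : List Char := pvRstrip (List.dropWhile pvSp s)

lemma stripChars_eq (s : List Char) : PySem.Chars.stripChars s [' '] = pvStrip s := by
  have hp : pvSp = (fun c => List.contains [' '] c) := by
    funext c; by_cases h : c = ' ' <;> simp [pvSp, h]
  unfold pvStrip pvRstrip
  rw [hp]
  rfl

lemma pvDelimsB_eq : pvDelimsB =
    ['{','}','[',']','(',')',',',';','.',':','=','+','-','*','/','%','?','!','&','^','|','<','>','\''] := by
  decide

lemma delims_agree (c : Char) : pvToSplitA.contains [c] = pvDelimsB.contains c := by
  simp [pvToSplitA, pvDelimsB_eq]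

lemma delim_ne_space {c : Char} (h : pvToSplitA.contains [c] = true) : pvSp c = false := by
  by_cases h' : c = ' '
  · subst h'; revert h; decide
  · simp [pvSp, h']

lemma not_delim_of_sp {x : Char} (h : pvSp x = true) : pvToSplitA.contains [x] = false := by
  have hx : x = ' ' := by simpa [pvSp] using h
  subst hx; decide

-- the alternating-segments view both ports are reduced to
def splitKeep (cs : List Char) : List (List Char) :=
  match cs with
  | [] => [[]]
  | c :: rest =>
    if pvToSplitA.contains [c] then [] :: [c] :: splitKeep rest
    else
      match splitKeep rest with
      | s :: ss => (c :: s) :: ss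
      | [] => [[c]]

def consHead (part : List Char) (l : List (List Char)) : List (List Char) :=
  match l with
  | s :: ss => (part ++ s) :: ss
  | [] => [part]

def tailF (l : List (List Char)) : List Char :=
  match l with
  | s :: ss => pvRstrip s ++ (ss.map pvStrip).flatten
  | [] => []

lemma splitKeep_ne_nil (cs : List Char) : splitKeep cs ≠ [] := by
  cases cs with
  | nil => simp [splitKeep]
  | cons c rest =>
    simp only [splitKeep]
    split
    · simp
    · split <;> simp

lemma consHead_nil_of_ne {l : List (List Char)} (h : l ≠ []) : consHead [] l = l := by
  cases l with
  | nil => exact absurd rfl h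
  | cons s ss => simp [consHead]

lemma pvStrip_nil : pvStrip [] = [] := rfl

lemma pvRstrip_nil : pvRstrip [] = [] := rfl

lemma pvStrip_singleton {c : Char} (h : pvSp c = false) : pvStrip [c] = [c] := by
  simp [pvStrip, pvRstrip, h]

lemma dropWhile_eq_nil_of_all {l : List Char} (h : ∀ x ∈ l, pvSp x = true) :
    List.dropWhile pvSp l = [] := by
  rw [List.dropWhile_eq_nil_iff]
  exact fun x hx => h x hx

lemma pvRstrip_spaces {l : List Char} (h : ∀ x ∈ l, pvSp x = true) : pvRstrip l = [] := by
  unfold pvRstrip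
  rw [dropWhile_eq_nil_of_all (fun x hx => h x (by simpa using hx))]
  rfl

lemma pvStrip_spaces {l : List Char} (h : ∀ x ∈ l, pvSp x = true) : pvStrip l = [] := by
  unfold pvStrip
  rw [dropWhile_eq_nil_of_all h]
  rfl

lemma pvStrip_space_prefix {l : List Char} (s : List Char) (h : ∀ x ∈ l, pvSp x = true) :
    pvStrip (l ++ s) = pvStrip s := by
  unfold pvStrip
  rw [List.dropWhile_append]
  simp [dropWhile_eq_nil_of_all h]

lemma pvRstrip_cons_of_ne {c : Char} (s : List Char) (h : pvSp c = false) :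
    pvRstrip (c :: s) = c :: pvRstrip s := by
  unfold pvRstrip
  rw [show (c :: s).reverse = s.reverse ++ [c] from by simp]
  rw [List.dropWhile_append]
  by_cases he : (List.dropWhile pvSp s.reverse).isEmpty
  · rw [if_pos he]
    rw [List.isEmpty_iff] at he
    simp [h, he]
  · rw [if_neg he]
    simp

lemma pvStrip_cons_of_ne {c : Char} (s : List Char) (h : pvSp c = false) :
    pvStrip (c :: s) = c :: pvRstrip s := by
  unfold pvStrip
  rw [List.dropWhile_cons, if_neg (by simp [h])]
  exact pvRstrip_cons_of_ne s h

lemma pvRstrip_append_of_head {c : Char} (l s : List Char) (h : pvSp c = false) :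
    pvRstrip (l ++ c :: s) = l ++ pvRstrip (c :: s) := by
  unfold pvRstrip
  rw [show (l ++ c :: s).reverse = (c :: s).reverse ++ l.reverse from by simp]
  rw [List.dropWhile_append]
  have hne : ¬ (List.dropWhile pvSp (c :: s).reverse).isEmpty := by
    rw [List.isEmpty_iff]
    intro hnil
    rw [List.dropWhile_eq_nil_iff] at hnil
    have h4 := hnil c (by simp)
    rw [h4] at h
    exact Bool.noConfusion h
  rw [if_neg hne]
  simp

lemma mem_takeWhile_sp : ∀ (l : List Char) (x : Char), x ∈ List.takeWhile pvSp l → pvSp x = true := by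
  intro l
  induction l with
  | nil => intro x hx; simp [List.takeWhile] at hx
  | cons a l ih =>
    intro x hx
    by_cases ha : pvSp a = true
    · rw [List.takeWhile_cons, if_pos ha] at hx
      rcases List.mem_cons.mp hx with rfl | hx
      · exact ha
      · exact ih x hx
    · rw [List.takeWhile_cons, if_neg ha] at hx
      simp at hx

lemma head_dropWhile_sp : ∀ (l : List Char) (d : Char) (tl : List Char),
    List.dropWhile pvSp l = d :: tl → pvSp d = false := by
  intro l
  induction l with
  | nil => intro d tl h; simp [List.dropWhile] at h
  | cons a l ih =>
    intro d tl h
    by_cases ha : pvSp a = true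
    · rw [List.dropWhile_cons, if_pos ha] at h
      exact ih d tl h
    · rw [List.dropWhile_cons, if_neg ha] at h
      obtain ⟨rfl, -⟩ := List.cons.inj h
      simpa using ha

lemma splitKeep_space_prefix {l : List Char} (m : List Char) (h : ∀ x ∈ l, pvSp x = true) :
    splitKeep (l ++ m) = consHead l (splitKeep m) := by
  induction l with
  | nil =>
    rw [List.nil_append, consHead_nil_of_ne (splitKeep_ne_nil m)]
  | cons c l ih =>
    have hc : pvToSplitA.contains [c] = false := not_delim_of_sp (h c (by simp))
    rw [List.cons_append]
    rw [show splitKeep (c :: (l ++ m)) =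
      (match splitKeep (l ++ m) with
       | s :: ss => (c :: s) :: ss
       | [] => [[c]]) from by rw [splitKeep, if_neg (by simpa using hc)]]
    rw [ih (fun x hx => h x (by simp [hx]))]
    cases hk : splitKeep m with
    | nil => exact absurd hk (splitKeep_ne_nil m)
    | cons s ss => simp [consHead]

-- A's loop produces exactly: strip each segment (the open part prefixes the first segment)
lemma lemA (cs : List Char) : ∀ (splitted : List (List Char)) (part : List Char),
    (rawGoA cs splitted part).flatten =
    splitted.flatten ++ ((consHead part (splitKeep cs)).map pvStrip).flatten := by
  induction cs with
  | nil =>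
    intro splitted part
    simp [rawGoA, splitKeep, consHead, stripChars_eq]
  | cons c rest ih =>
    intro splitted part
    by_cases h : pvToSplitA.contains [c] = true
    · rw [show rawGoA (c :: rest) splitted part =
        rawGoA rest (splitted ++ [PySem.Chars.stripChars part [' '], [c]]) [] from by
          rw [rawGoA, if_pos h]]
      rw [ih]
      rw [show splitKeep (c :: rest) = [] :: [c] :: splitKeep rest from by
        rw [splitKeep, if_pos h]]
      rw [consHead_nil_of_ne (splitKeep_ne_nil rest)]
      simp [consHead, stripChars_eq, pvStrip_singleton (delim_ne_space h)]
    · rw [show rawGoA (c :: rest) splitted part = rawGoA rest splitted (part ++ [c]) from by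
        rw [rawGoA, if_neg h]]
      rw [ih]
      rw [show splitKeep (c :: rest) =
        (match splitKeep rest with
         | s :: ss => (c :: s) :: ss
         | [] => [[c]]) from by
          rw [splitKeep, if_neg h]]
      cases hk : splitKeep rest with
      | nil => exact absurd hk (splitKeep_ne_nil rest)
      | cons s ss => simp [consHead]

-- B's run-scan produces the same segment-wise strip (rstrip only, mid-segment)
lemma lemB : ∀ (n : Nat) (cs : List Char), cs.length ≤ n →
    (rawGoB true cs = ((splitKeep cs).map pvStrip).flatten) ∧
    (rawGoB false cs = tailF (splitKeep cs)) := by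
  intro n
  induction n with
  | zero =>
    intro cs hlen
    have hnil : cs = [] := List.eq_nil_of_length_eq_zero (Nat.le_zero.mp hlen)
    subst hnil
    constructor <;> simp [rawGoB, splitKeep, tailF, pvStrip_nil, pvRstrip_nil]
  | succ n ih =>
    intro cs hlen
    cases cs with
    | nil => constructor <;> simp [rawGoB, splitKeep, tailF, pvStrip_nil, pvRstrip_nil]
    | cons c rest =>
      have hrest : rest.length ≤ n := Nat.lt_succ_iff.mp (by simpa using hlen)
      by_cases hsp : pvSp c = true
      · -- c = ' ' : the run branch of rawGoB
        have hc : c = ' ' := by simpa [pvSp] using hsp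
        subst hc
        have hB : ∀ b, rawGoB b (' ' :: rest) =
            (if (b || (match List.dropWhile pvSp rest with
                       | [] => true
                       | d :: _ => pvDelimsB.contains d)) = true then []
             else ' ' :: List.takeWhile pvSp rest) ++ rawGoB b (List.dropWhile pvSp rest) := by
          intro b
          rw [rawGoB]
          simp only [show (fun x : Char => x == ' ') = pvSp from rfl]
          simp
        have hrunT : ∀ x ∈ ' ' :: List.takeWhile pvSp rest, pvSp x = true := by
          intro x hx
          rcases List.mem_cons.mp hx with rfl | hx
          · simp [pvSp]
          · exact mem_takeWhile_sp rest x hx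
        have hdecomp : (' ' :: rest : List Char) =
            (' ' :: List.takeWhile pvSp rest) ++ List.dropWhile pvSp rest := by
          simp [List.takeWhile_append_dropWhile]
        have hdrop : (List.dropWhile pvSp rest).length ≤ n :=
          le_trans (rest.length_dropWhile_le pvSp) hrest
        have ihd := ih (List.dropWhile pvSp rest) hdrop
        have hK : splitKeep (' ' :: rest) = consHead (' ' :: List.takeWhile pvSp rest)
            (splitKeep (List.dropWhile pvSp rest)) := by
          have h2 := splitKeep_space_prefix (l := ' ' :: List.takeWhile pvSp rest)
            (List.dropWhile pvSp rest) hrunT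
          rw [← hdecomp] at h2
          exact h2
        have h1 : pvStrip (' ' :: List.takeWhile pvSp rest) = [] := pvStrip_spaces hrunT
        have h2 : pvRstrip (' ' :: List.takeWhile pvSp rest) = [] := pvRstrip_spaces hrunT
        cases hre : List.dropWhile pvSp rest with
        | nil =>
          have hKall : splitKeep (' ' :: rest) = [' ' :: List.takeWhile pvSp rest] := by
            rw [hK, hre]; simp [splitKeep, consHead]
          have hend : ∀ b, rawGoB b (' ' :: rest) = [] := by
            intro b
            rw [hB b, hre]
            cases b <;> simp [rawGoB]
          constructor
          · rw [hend true, hKall]; simp [h1]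
          · rw [hend false, hKall]; simp [tailF, h2]
        | cons d tl =>
          rw [hre] at ihd
          have hd : pvSp d = false := head_dropWhile_sp rest d tl hre
          by_cases hdel : pvToSplitA.contains [d] = true
          · -- right neighbour is a delimiter: the run is dropped under either flag
            have hdB : pvDelimsB.contains d = true := by rw [← delims_agree]; exact hdel
            have hKd : splitKeep (d :: tl) = [] :: [d] :: splitKeep tl := by
              rw [splitKeep, if_pos hdel]
            have hend : ∀ b, rawGoB b (' ' :: rest) = rawGoB b (d :: tl) := by
              intro b
              rw [hB b, hre]
              simp [show d ∈ pvDelimsB from by simpa using hdB]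
            have hKK : splitKeep (' ' :: rest) =
                (' ' :: List.takeWhile pvSp rest) :: [d] :: splitKeep tl := by
              rw [hK, hre, hKd]; simp [consHead]
            constructor
            · rw [hend true, ihd.1, hKK, hKd]
              simp [h1, pvStrip_nil]
            · rw [hend false, ihd.2, hKK, hKd]
              simp [tailF, h2, pvRstrip_nil]
          · -- right neighbour is plain: the run survives iff leftCut is false
            have hdB : pvDelimsB.contains d = false := by
              rw [← delims_agree]; simpa using hdel
            obtain ⟨s₀, ss, hKt⟩ : ∃ s₀ ss, splitKeep tl = s₀ :: ss := by
              cases hkk : splitKeep tl with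
              | nil => exact absurd hkk (splitKeep_ne_nil tl)
              | cons a b => exact ⟨a, b, rfl⟩
            have hKd : splitKeep (d :: tl) = (d :: s₀) :: ss := by
              rw [splitKeep, if_neg hdel, hKt]
            have hKK : splitKeep (' ' :: rest) =
                ((' ' :: List.takeWhile pvSp rest) ++ d :: s₀) :: ss := by
              rw [hK, hre, hKd]; simp [consHead]
            constructor
            · have hend : rawGoB true (' ' :: rest) = rawGoB true (d :: tl) := by
                rw [hB true, hre]; simp
              rw [hend, ihd.1, hKK, hKd]
              simp only [List.map_cons, List.flatten_cons]
              rw [pvStrip_space_prefix (l := ' ' :: List.takeWhile pvSp rest) (d :: s₀) hrunT]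
            · have hend : rawGoB false (' ' :: rest) =
                  (' ' :: List.takeWhile pvSp rest) ++ rawGoB false (d :: tl) := by
                rw [hB false, hre]; simp [show d ∉ pvDelimsB from by simpa using hdB]
              rw [hend, ihd.2, hKd, hKK]
              simp only [tailF]
              rw [pvRstrip_append_of_head _ _ hd]
              simp
      · -- c non-space
        have hspf : pvSp c = false := by simpa using hsp
        have hsp' : (c == ' ') = false := hspf
        have hB : ∀ b, rawGoB b (c :: rest) = c :: rawGoB (pvDelimsB.contains c) rest := by
          intro b; rw [rawGoB]; simp [hsp']
        by_cases hdel : pvToSplitA.contains [c] = true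
        · -- delimiter
          have hdB : pvDelimsB.contains c = true := by rw [← delims_agree]; exact hdel
          have hK : splitKeep (c :: rest) = [] :: [c] :: splitKeep rest := by
            rw [splitKeep, if_pos hdel]
          constructor
          · rw [hB true, hK, hdB, (ih rest hrest).1]
            simp [pvStrip_nil, pvStrip_singleton (delim_ne_space hdel)]
          · rw [hB false, hK, hdB, (ih rest hrest).1]
            simp [tailF, pvRstrip_nil, pvStrip_singleton (delim_ne_space hdel)]
        · -- plain character
          have hdB : pvDelimsB.contains c = false := by
            rw [← delims_agree]; simpa using hdel
          obtain ⟨s, ss, hk⟩ : ∃ s ss, splitKeep rest = s :: ss := by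
            cases hkk : splitKeep rest with
            | nil => exact absurd hkk (splitKeep_ne_nil rest)
            | cons a b => exact ⟨a, b, rfl⟩
          have hK : splitKeep (c :: rest) = (c :: s) :: ss := by
            rw [splitKeep, if_neg hdel, hk]
          have hBf := (ih rest hrest).2
          rw [hk] at hBf
          constructor
          · rw [hB true, hK, hdB, hBf]
            simp only [tailF, List.map_cons, List.flatten_cons]
            rw [pvStrip_cons_of_ne s hspf]
            simp
          · rw [hB false, hK, hdB, hBf]
            simp only [tailF]
            rw [pvRstrip_cons_of_ne s hspf]
            simp

-- ===== VERDICT (by name: the statement is the Claim_ definition above) =====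
theorem raw_normal_spec : Claim_equal_raw_normal := by
  intro line _
  unfold Spec_raw_normal raw_normal raw_normal_alt
  have hA := lemA line.toList [] []
  have hB := (lemB line.toList.length line.toList le_rfl).1
  have hAB : (rawGoA line.toList [] []).flatten = rawGoB true line.toList := by
    rw [hA, hB, consHead_nil_of_ne (splitKeep_ne_nil line.toList)]
    simp
  have htl : String.toList "else" = ['e','l','s','e'] := rfl
  by_cases he : rawGoB true line.toList = ['e','l','s','e']
  · simp [hAB, htl, he]
  · simp [hAB, htl, he]
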